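-- pv_equiv track=rewrite | github.com/pypi-data/pypi-mirror-57 | packages/explorator/explorator-0.0.9-py3-none-any.whl/explorator/functions.py | filtered_string_DEPRECATED
-- ===== SOURCE A (Python) =====
-- def filtered_string_DEPRECATED(content, delete_words=None):
--     """
--     Эта функция делает следующие  преобразования со строкой:
--     - Удаляет пробелы по краям строки
--     - Удаляет подстроки из списка delete_words
--     - Удаляет пробелы подряд в строке, оставляя один
--
--     Parameters
--     ----------
--     content: (str) - целевая строка
--     delete_words: (list of str) - подстроки, которые надо удалить из целевой строки
--
--     Returns
--     -------
--     (str) - обработанная строка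
--     """
--
--     if delete_words is None:
--         delete_words = []
--     if content != float('nan'):
--         content = str(content)
--         if delete_words:
--             for word in delete_words:
--                 content = content.replace(word, '')
--         content = content.strip()
--         tmp = ''
--         i = 0
--         while i < len(content):
--             if (i < len(content) - 1) and (content[i] + content[i + 1] != '  '):
--                 tmp += content[i]
--             elif i == len(content) - 1:
--                 tmp += content[i]
--             i += 1
--         content = tmp
--     return content
-- ===== SOURCE B (Python) =====
-- def filtered_string_DEPRECATED(content, delete_words=None):
--     content = str(content)
--     for word in (delete_words or []):
--         content = content.replace(word, '')
--     return ' '.join(filter(None, content.strip().split(' ')))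
-- ===== Notes on version B (the rewrite author's own statement) =====
-- stated objective: simpler
-- what changed: The char-by-char look-ahead while-loop that collapses runs of spaces is replaced by a tokenize-and-rejoin pass: split on the literal space character, drop the empty tokens, join with one space; the always-true nan guard and the redundant non-empty check before the replacement loop are also dropped.
import Mathlib
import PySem

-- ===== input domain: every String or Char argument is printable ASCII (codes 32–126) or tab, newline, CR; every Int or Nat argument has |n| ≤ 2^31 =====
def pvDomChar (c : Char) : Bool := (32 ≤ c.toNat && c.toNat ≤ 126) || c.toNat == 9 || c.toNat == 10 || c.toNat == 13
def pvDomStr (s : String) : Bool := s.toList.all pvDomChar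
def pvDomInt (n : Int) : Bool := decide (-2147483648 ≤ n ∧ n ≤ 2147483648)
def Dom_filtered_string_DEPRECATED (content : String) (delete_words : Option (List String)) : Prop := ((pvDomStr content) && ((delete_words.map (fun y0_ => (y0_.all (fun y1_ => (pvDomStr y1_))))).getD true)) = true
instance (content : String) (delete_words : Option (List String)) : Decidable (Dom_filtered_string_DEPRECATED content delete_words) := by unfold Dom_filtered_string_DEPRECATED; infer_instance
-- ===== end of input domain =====

-- B replaces A's char-by-char look-ahead space-collapsing while-loop by a split-on-space / drop-empty-tokens / rejoin pass (simpler decomposition, same result).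

-- ===== PORT A =====
-- A's while-loop: i runs over the indices of the stripped string, appending content[i]
-- unless it is a space immediately followed by a space (content[i] + content[i+1] == '  ');
-- both indexed accesses are guarded by i < len (resp. i < len - 1), so plain getD is exact here
def pvLoopA (s : List Char) (i : Nat) (tmp : List Char) : List Char :=
  if i < s.length then
    pvLoopA s (i + 1)
      (if i < s.length - 1 ∧ ¬(s.getD i ' ' = ' ' ∧ s.getD (i + 1) ' ' = ' ') then tmp ++ [s.getD i ' ']
       else if i = s.length - 1 then tmp ++ [s.getD i ' '] else tmp)
  else tmp
termination_by s.length - i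

def filtered_string_DEPRECATED (content : String) (delete_words : Option (List String)) : String :=
  let dws : List String := match delete_words with | none => [] | some l => l
  -- `content != float('nan')` is always True (nothing compares equal to nan), so that branch is always taken;
  -- `str(content)` is the identity on a str
  let content1 := if dws.isEmpty then content else dws.foldl (fun c w => PySem.Str.replace c w "") content
  let content2 := PySem.Str.strip content1
  String.ofList (pvLoopA content2.toList 0 [])

-- ===== PORT B =====
def filtered_string_DEPRECATED_alt (content : String) (delete_words : Option (List String)) : String :=
  let dws : List String := match delete_words with | none => [] | some l => l   -- (delete_words or [])
  let content1 := dws.foldl (fun c w => PySem.Str.replace c w "") content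
  PySem.Str.join " " (((PySem.Str.split? (PySem.Str.strip content1) " ").getD []).filter (fun t => !t.isEmpty))

-- ===== PRECONDITION & SPEC =====
def Spec_filtered_string_DEPRECATED (content : String) (delete_words : Option (List String)) (out : String) : Prop := out = filtered_string_DEPRECATED_alt content delete_words
instance (content : String) (delete_words : Option (List String)) (out : String) : Decidable (Spec_filtered_string_DEPRECATED content delete_words out) := by unfold Spec_filtered_string_DEPRECATED; infer_instance

-- ===== CLAIM (what is proved, stated in full; the proofs are below) =====
def Claim_equal_filtered_string_DEPRECATED : Prop := ∀ (content : String) (delete_words : Option (List String)), Dom_filtered_string_DEPRECATED content delete_words → Spec_filtered_string_DEPRECATED content delete_words (filtered_string_DEPRECATED content delete_words)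

-- ===== LEMMAS AND PROOFS =====

-- A's while-loop written structurally: drop a space that is immediately followed by a space
def squeeze : List Char → List Char
  | [] => []
  | [c] => [c]
  | c :: d :: t => if c = ' ' ∧ d = ' ' then squeeze (d :: t) else c :: squeeze (d :: t)

-- splitting on the single space character: (first part, remaining parts)
def sp : List Char → List Char × List (List Char)
  | [] => ([], [])
  | c :: t =>
      if c = ' ' then ([], (sp t).1 :: (sp t).2)
      else (c :: (sp t).1, (sp t).2)

-- joining parts with one space
def Jn : List (List Char) → List Char
  | [] => []
  | [p] => p
  | p :: q :: r => p ++ ' ' :: Jn (q :: r)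

theorem Jn_eq_intercalate : ∀ ps : List (List Char), [' '].intercalate ps = Jn ps := by
  intro ps
  induction ps with
  | nil => simp [Jn, List.intercalate]
  | cons p rest ih =>
      cases rest with
      | nil => simp [Jn, List.intercalate]
      | cons q r =>
          rw [Jn, ← ih]
          simp [List.intercalate, List.intersperse]

theorem pvLoopA_eq (s : List Char) : ∀ i tmp, pvLoopA s i tmp = tmp ++ squeeze (s.drop i) := by
  have main : ∀ n i tmp, s.length - i ≤ n → pvLoopA s i tmp = tmp ++ squeeze (s.drop i) := by
    intro n
    induction n with
    | zero =>
        intro i tmp h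
        have hi : ¬ i < s.length := by omega
        have : s.drop i = [] := List.drop_eq_nil_of_le (by omega)
        rw [pvLoopA, this]
        simp [hi, squeeze]
    | succ n ih =>
        intro i tmp h
        by_cases hi : i < s.length
        · have hd1 : s.drop i = s[i] :: s.drop (i + 1) := List.drop_eq_getElem_cons hi
          have hgd : s.getD i ' ' = s[i] := List.getD_eq_getElem s ' ' hi
          rw [pvLoopA]
          rw [if_pos hi, ih _ _ (by omega), hgd]
          by_cases hlt : i < s.length - 1
          · have hi1 : i + 1 < s.length := by omega
            have hd2 : s.drop (i + 1) = s[i + 1] :: s.drop (i + 2) := List.drop_eq_getElem_cons hi1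
            have hgd1 : s.getD (i + 1) ' ' = s[i + 1] := List.getD_eq_getElem s ' ' hi1
            have hne : ¬ i = s.length - 1 := by omega
            rw [hgd1, hd1, hd2, squeeze, ← hd2]
            by_cases hsp : s[i] = ' ' ∧ s[i + 1] = ' '
            · rw [if_neg (by tauto), if_neg hne, if_pos hsp]
            · rw [if_pos ⟨hlt, hsp⟩, if_neg hsp]
              simp
          · have hlast : i = s.length - 1 := by omega
            have hnil : s.drop (i + 1) = [] := List.drop_eq_nil_of_le (by omega)
            rw [hd1, hnil, if_neg (by tauto), if_pos hlast]
            simp [squeeze]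
        · have : s.drop i = [] := List.drop_eq_nil_of_le (by omega)
          rw [pvLoopA, this]
          simp [hi, squeeze]
  intro i tmp
  exact main (s.length - i) i tmp le_rfl

theorem go_eq_sp : ∀ (l : List Char) (fuel : Nat) (cur : List Char) (acc : List (List Char)),
    l.length ≤ fuel →
    PySem.Chars.splitOn.go [' '] fuel l cur acc
      = acc.reverse ++ (cur.reverse ++ (sp l).1) :: (sp l).2 := by
  intro l
  induction l with
  | nil =>
      intro fuel cur acc _
      cases fuel <;> simp [PySem.Chars.splitOn.go, sp]
  | cons c t ih =>
      intro fuel cur acc h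
      cases fuel with
      | zero => simp at h
      | succ f =>
          rw [PySem.Chars.splitOn.go]
          by_cases hc : c = ' '
          · have hpre : [' '].isPrefixOf (c :: t) = true := by
              simp [List.isPrefixOf, hc]
            rw [if_pos hpre]
            have hdrop : List.drop [' '].length (c :: t) = t := by simp
            rw [hdrop]
            simp only [List.length_cons] at h
            rw [ih f [] ((cur.reverse) :: acc) (by omega)]
            simp [sp, hc]
          · have hpre : ¬ [' '].isPrefixOf (c :: t) = true := by
              simp [List.isPrefixOf]
              exact fun hh => hc hh.symm
            rw [if_neg hpre]
            simp only [List.length_cons] at h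
            rw [ih f (c :: cur) acc (by omega)]
            simp [sp, hc]

theorem splitOn_space (l : List Char) :
    PySem.Chars.splitOn l [' '] = (sp l).1 :: (sp l).2 := by
  rw [PySem.Chars.splitOn, go_eq_sp l (l.length + 1) [] [] (by omega)]
  simp

theorem sp_no_space (l : List Char) :
    (∀ c ∈ (sp l).1, c ≠ ' ') ∧ (∀ p ∈ (sp l).2, ∀ c ∈ p, c ≠ ' ') := by
  induction l with
  | nil => simp [sp]
  | cons c t ih =>
      by_cases hc : c = ' '
      · simp only [sp, if_pos hc]
        refine ⟨by simp, ?_⟩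
        intro p hp
        simp only [List.mem_cons] at hp
        rcases hp with rfl | hp
        · exact ih.1
        · exact ih.2 p hp
      · simp only [sp, if_neg hc]
        refine ⟨?_, ih.2⟩
        intro d hd
        simp only [List.mem_cons] at hd
        rcases hd with rfl | hd
        · exact hc
        · exact ih.1 d hd

theorem Jn_sp (l : List Char) : Jn ((sp l).1 :: (sp l).2) = l := by
  induction l with
  | nil => simp [sp, Jn]
  | cons c t ih =>
      by_cases hc : c = ' '
      · simp only [sp, if_pos hc]
        rw [Jn, ih, hc]
        simp
      · simp only [sp, if_neg hc]
        cases h2 : (sp t).2 with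
        | nil =>
            rw [h2] at ih
            rw [Jn]
            rw [Jn] at ih
            rw [ih]
        | cons q r =>
            rw [h2] at ih
            rw [Jn] at ih
            rw [Jn, List.cons_append, ih]

theorem squeeze_cons_ne (c : Char) (t : List Char) (hc : c ≠ ' ') :
    squeeze (c :: t) = c :: squeeze t := by
  cases t with
  | nil => simp [squeeze]
  | cons d r => rw [squeeze, if_neg (by tauto)]

theorem squeeze_word : ∀ (w rest : List Char), (∀ c ∈ w, c ≠ ' ') →
    squeeze (w ++ rest) = w ++ squeeze rest := by
  intro w
  induction w with
  | nil => intro rest _; simp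
  | cons c t ih =>
      intro rest hw
      rw [List.cons_append, squeeze_cons_ne c _ (hw c (by simp)),
        ih rest (fun d hd => hw d (by simp [hd]))]
      simp

theorem filter_ne_nil : ∀ (l : List (List Char)), l ≠ [] → l.getLast? ≠ some [] →
    l.filter (fun q => !q.isEmpty) ≠ [] := by
  intro l
  induction l with
  | nil => intro h; simp at h
  | cons x rest ih =>
      intro _ hlast
      cases rest with
      | nil =>
          have hx : x ≠ [] := by intro hnil; exact hlast (by simp [hnil])
          simp [hx]
      | cons y r =>
          have := ih (by simp) (by rwa [List.getLast?_cons_cons] at hlast)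
          by_cases hx : x = []
          · subst hx; simpa [List.filter] using this
          · simp [List.filter_cons, hx]

theorem squeeze_space_parts : ∀ (ps : List (List Char)), ps ≠ [] →
    (∀ p ∈ ps, ∀ c ∈ p, c ≠ ' ') → ps.getLast? ≠ some [] →
    squeeze (' ' :: Jn ps) = ' ' :: Jn (ps.filter (fun q => !q.isEmpty)) := by
  intro ps
  induction ps with
  | nil => intro h; simp at h
  | cons p rest ih =>
      intro _ hns hlast
      cases rest with
      | nil =>
          have hp : p ≠ [] := by
            intro hnil
            exact hlast (by simp [hnil])
          cases p with
          | nil => exact absurd rfl hp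
          | cons c t =>
              have hc : c ≠ ' ' := hns (c :: t) (by simp) c (by simp)
              have hw : ∀ d ∈ c :: t, d ≠ ' ' := hns (c :: t) (by simp)
              have h1 : squeeze (' ' :: c :: t) = ' ' :: squeeze (c :: t) := by
                rw [squeeze, if_neg (by tauto)]
              have h2 := squeeze_word (c :: t) [] hw
              simp only [List.append_nil] at h2
              rw [Jn, h1, h2]
              simp [Jn, squeeze]
      | cons q r =>
          have hlast' : (q :: r).getLast? ≠ some [] := by
            rwa [List.getLast?_cons_cons] at hlast
          have hns' : ∀ p ∈ q :: r, ∀ c ∈ p, c ≠ ' ' :=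
            fun p hp => hns p (by simp [hp])
          have ihr := ih (by simp) hns' hlast'
          by_cases hp : p = []
          · subst hp
            have h1 : squeeze (' ' :: ' ' :: Jn (q :: r)) = squeeze (' ' :: Jn (q :: r)) := by
              rw [squeeze, if_pos ⟨rfl, rfl⟩]
            rw [Jn, List.nil_append, h1, ihr]
            simp [List.filter]
          · obtain ⟨c, t, rfl⟩ : ∃ c t, p = c :: t := by
              cases p with
              | nil => exact absurd rfl hp
              | cons c t => exact ⟨c, t, rfl⟩
            have hc : c ≠ ' ' := hns (c :: t) (by simp) c (by simp)
            have hw : ∀ d ∈ c :: t, d ≠ ' ' := hns (c :: t) (by simp)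
            have hsplit : (c :: t) ++ (' ' :: Jn (q :: r)) = c :: (t ++ (' ' :: Jn (q :: r))) := by
              simp
            have h1 : squeeze (' ' :: ((c :: t) ++ (' ' :: Jn (q :: r))))
                = ' ' :: squeeze ((c :: t) ++ (' ' :: Jn (q :: r))) := by
              rw [hsplit, squeeze, if_neg (by tauto)]
            have h2 := squeeze_word (c :: t) (' ' :: Jn (q :: r)) hw
            have hfq : List.filter (fun q => !q.isEmpty) (q :: r) ≠ [] :=
              filter_ne_nil (q :: r) (by simp) hlast'
            obtain ⟨f, fs, hffs⟩ : ∃ f fs, List.filter (fun q => !q.isEmpty) (q :: r) = f :: fs := by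
              cases hE : List.filter (fun q => !q.isEmpty) (q :: r) with
              | nil => exact absurd hE hfq
              | cons f fs => exact ⟨f, fs, rfl⟩
            have hfcons : List.filter (fun q => !q.isEmpty) ((c :: t) :: q :: r)
                = (c :: t) :: List.filter (fun q => !q.isEmpty) (q :: r) := by simp
            rw [Jn, h1, h2, ihr, hfcons, hffs, Jn]

theorem sp_getLast : ∀ (l : List Char) (d : Char), l.getLast? = some d → d ≠ ' ' →
    ((sp l).1 :: (sp l).2).getLast? ≠ some [] := by
  intro l
  induction l with
  | nil => intro d hd _; simp at hd
  | cons c t ih =>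
      intro d hd hds
      cases t with
      | nil =>
          have hdc : c = d := by simpa using hd
          subst hdc
          simp [sp, hds]
      | cons e u =>
          rw [List.getLast?_cons_cons] at hd
          have IH := ih d hd hds
          by_cases hc : c = ' '
          · have hsp : sp (c :: e :: u) = ([], (sp (e :: u)).1 :: (sp (e :: u)).2) := by
              rw [sp]; simp [hc]
            rw [hsp]
            dsimp only
            rwa [List.getLast?_cons_cons]
          · have hsp : sp (c :: e :: u) = (c :: (sp (e :: u)).1, (sp (e :: u)).2) := by
              rw [sp]; simp [hc]
            rw [hsp]
            dsimp only
            cases h2 : (sp (e :: u)).2 with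
            | nil => simp
            | cons y ys =>
                rw [h2] at IH
                rw [List.getLast?_cons_cons] at IH ⊢
                exact IH

theorem squeeze_eq_join (l : List Char)
    (hh : ∀ c, l.head? = some c → c ≠ ' ')
    (hl : ∀ d, l.getLast? = some d → d ≠ ' ') :
    squeeze l = Jn (((sp l).1 :: (sp l).2).filter (fun q => !q.isEmpty)) := by
  cases l with
  | nil => simp [squeeze, sp, Jn]
  | cons c t =>
      have hc : c ≠ ' ' := hh c rfl
      obtain ⟨d, hd⟩ : ∃ d, (c :: t).getLast? = some d := by
        cases h : (c :: t).getLast? with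
        | none => simp at h
        | some d => exact ⟨d, rfl⟩
      have hds : d ≠ ' ' := hl d hd
      have hlastne := sp_getLast (c :: t) d hd hds
      have hsp1 : (sp (c :: t)).1 = c :: (sp t).1 := by simp [sp, hc]
      have hnos := sp_no_space (c :: t)
      -- l = Jn (parts)
      have hJ := Jn_sp (c :: t)
      cases h2 : (sp (c :: t)).2 with
      | nil =>
          rw [h2] at hJ hlastne
          rw [Jn] at hJ
          have hfil : List.filter (fun q => !q.isEmpty) [(sp (c :: t)).1] = [(sp (c :: t)).1] := by
            simp only [List.filter]
            rw [hsp1]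
            simp
          have hsq := squeeze_word (sp (c :: t)).1 [] (by intro x hx; exact (hnos.1) x hx)
          simp only [List.append_nil] at hsq
          conv_lhs => rw [← hJ]
          rw [hsq, hfil, Jn]
          simp [squeeze]
      | cons q r =>
          rw [h2] at hJ hlastne hnos
          rw [Jn] at hJ
          have hlast' : (q :: r).getLast? ≠ some [] := by
            rwa [List.getLast?_cons_cons] at hlastne
          have hS := squeeze_space_parts (q :: r) (by simp) hnos.2 hlast'
          have hW := squeeze_word (sp (c :: t)).1 (' ' :: Jn (q :: r)) hnos.1
          have hfil : List.filter (fun q => !q.isEmpty) ((sp (c :: t)).1 :: q :: r)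
              = (sp (c :: t)).1 :: List.filter (fun q => !q.isEmpty) (q :: r) := by
            rw [List.filter]
            rw [hsp1]
            simp
          have hfq : List.filter (fun q => !q.isEmpty) (q :: r) ≠ [] :=
            filter_ne_nil (q :: r) (by simp) hlast'
          obtain ⟨f, fs, hffs⟩ : ∃ f fs, List.filter (fun q => !q.isEmpty) (q :: r) = f :: fs := by
            cases hE : List.filter (fun q => !q.isEmpty) (q :: r) with
            | nil => exact absurd hE hfq
            | cons f fs => exact ⟨f, fs, rfl⟩
          conv_lhs => rw [← hJ]
          rw [hW, hS, hfil, hffs, Jn]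

theorem head?_dropWhile {α : Type} (p : α → Bool) :
    ∀ (l : List α) (c : α), (List.dropWhile p l).head? = some c → p c = false := by
  intro l
  induction l with
  | nil => intro c h; simp at h
  | cons a t ih =>
      intro c h
      rw [List.dropWhile] at h
      by_cases ha : p a
      · rw [ha] at h
        exact ih c h
      · rw [Bool.not_eq_true] at ha
        rw [ha] at h
        simp at h
        rw [← h]
        exact ha

theorem getLast?_dropWhile {α : Type} (p : α → Bool) (l : List α) (c : α)
    (h : (List.dropWhile p l).getLast? = some c) : l.getLast? = some c := by
  obtain ⟨s, hs⟩ := List.dropWhile_suffix (l := l) (p := p)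
  have hne : List.dropWhile p l ≠ [] := by
    intro hnil; rw [hnil] at h; simp at h
  rw [← hs, List.getLast?_append, h]
  rfl

theorem strip_last (l : List Char) (c : Char) (h : (PySem.Chars.strip l).getLast? = some c) :
    PySem.Chars.isspace c = false := by
  rw [PySem.Chars.strip, PySem.Chars.rstrip, List.getLast?_reverse] at h
  exact head?_dropWhile _ _ _ h

theorem strip_head (l : List Char) (c : Char) (h : (PySem.Chars.strip l).head? = some c) :
    PySem.Chars.isspace c = false := by
  rw [PySem.Chars.strip, PySem.Chars.rstrip, List.head?_reverse] at h
  have h2 := getLast?_dropWhile _ _ _ h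
  rw [List.getLast?_reverse] at h2
  unfold PySem.Chars.lstrip at h2
  exact head?_dropWhile _ _ _ h2

theorem isEmpty_ofList (q : List Char) : (String.ofList q).isEmpty = q.isEmpty := by
  cases q with
  | nil => rfl
  | cons c t =>
      have h := Char.utf8Size_pos c
      simp [String.isEmpty, String.ofList, List.utf8Encode]
      omega
theorem filter_map_ofList (ps : List (List Char)) :
    (ps.map String.ofList).filter (fun t => !t.isEmpty)
      = (ps.filter (fun q => !q.isEmpty)).map String.ofList := by
  rw [List.filter_map]
  congr 1
  apply List.filter_congr
  intro q _
  simp [isEmpty_ofList]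

-- the two ports agree once the shared replace-fold and strip are factored out
theorem core_eq (r : String) :
    String.ofList (pvLoopA (PySem.Str.strip r).toList 0 [])
      = PySem.Str.join " " (((PySem.Str.split? (PySem.Str.strip r) " ").getD []).filter (fun t => !t.isEmpty)) := by
  have hsl : (PySem.Str.strip r).toList = PySem.Chars.strip r.toList := by
    simp [PySem.Str.strip]
  set s : List Char := PySem.Chars.strip r.toList with hs
  have hh : ∀ c, s.head? = some c → c ≠ ' ' := by
    intro c hc heq
    have h1 := strip_head r.toList c hc
    rw [heq] at h1
    exact absurd h1 (by decide)
  have hl : ∀ d, s.getLast? = some d → d ≠ ' ' := by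
    intro d hd heq
    have h1 := strip_last r.toList d hd
    rw [heq] at h1
    exact absurd h1 (by decide)
  have hsep : (" " : String).toList = [' '] := rfl
  have hsplit : PySem.Str.split? (PySem.Str.strip r) " "
      = some (((sp s).1 :: (sp s).2).map String.ofList) := by
    rw [PySem.Str.split?, hsl, hsep, PySem.Chars.split?, if_neg (by decide), splitOn_space]
    rfl
  rw [hsl, hsplit]
  rw [pvLoopA_eq s 0 []]
  simp only [List.drop_zero, List.nil_append]
  rw [squeeze_eq_join s hh hl]
  rw [Option.getD_some, filter_map_ofList, PySem.Str.join, PySem.Chars.join, hsep]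
  rw [List.map_map]
  have hmap : (String.toList ∘ String.ofList) = id := by
    funext q
    simp
  rw [hmap, List.map_id, Jn_eq_intercalate]

-- ===== VERDICT (by name: the statement is the Claim_ definition above) =====
theorem filtered_string_DEPRECATED_spec : Claim_equal_filtered_string_DEPRECATED := by
  intro content delete_words _
  unfold Spec_filtered_string_DEPRECATED
  cases delete_words with
  | none => exact core_eq content
  | some l =>
      cases l with
      | nil => exact core_eq content
      | cons w ws =>
          exact core_eq ((w :: ws).foldl (fun c v => PySem.Str.replace c v "") content)
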